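-- pv_equiv track=rewrite | github.com/EBIFRY-USER/nonogram_20x20_pygame | nonogram_pygame.py | get_row_hints
-- ===== SOURCE A (Python) =====
-- def get_row_hints(row):
--     hints = []
--     count = 0
--     for cell in row:
--         if cell == "*":
--             count += 1
--         else:
--             if count > 0:
--                 hints.append(count)
--                 count = 0
--     if count > 0:
--         hints.append(count)
--     return hints[::-1]  # Reverse the hints list
-- ===== SOURCE B (Python) =====
-- def get_row_hints(row):
--     # Boundary detection instead of run counting: find the index of each
--     # run start (a "*" whose left neighbour is not "*") and each run end
--     # (a "*" whose right neighbour is not "*"); the k-th start pairs with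
--     # the k-th end, and each hint is end - start + 1.  Pairing the
--     # reversed index lists yields the hints already in reversed order.
--     n = len(row)
--     starts = [i for i in range(n)
--               if row[i] == "*" and (i == 0 or row[i - 1] != "*")]
--     ends = [i for i in range(n)
--             if row[i] == "*" and (i == n - 1 or row[i + 1] != "*")]
--     return [e - s + 1 for s, e in zip(reversed(starts), reversed(ends))]
-- ===== Notes on version B (the rewrite author's own statement) =====
-- stated objective: alternative
-- what changed: Replaces A's stateful cell-by-cell walk (counter, flush, final reversal) by boundary detection: two comprehensions collect the indices of run starts and run ends, and each hint is computed arithmetically as end - start + 1 from the reversed index lists.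
import Mathlib
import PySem

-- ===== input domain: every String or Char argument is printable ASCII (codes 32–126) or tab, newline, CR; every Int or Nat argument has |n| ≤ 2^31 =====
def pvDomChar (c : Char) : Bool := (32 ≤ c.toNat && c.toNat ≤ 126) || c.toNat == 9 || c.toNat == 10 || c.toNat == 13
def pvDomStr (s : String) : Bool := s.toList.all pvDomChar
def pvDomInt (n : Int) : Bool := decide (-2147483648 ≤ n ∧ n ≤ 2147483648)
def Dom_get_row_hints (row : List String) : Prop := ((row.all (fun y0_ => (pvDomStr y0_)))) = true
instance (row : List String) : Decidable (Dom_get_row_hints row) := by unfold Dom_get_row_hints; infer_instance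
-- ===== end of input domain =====

-- B replaces A's stateful walk (counter + flush + final reversal) by boundary
-- detection: it collects the indices of run starts and run ends and computes
-- each hint arithmetically as end - start + 1. (alternative)

-- ===== PORT A =====
-- the body of A's for-loop, as a named fold step
def pvStepA (st : List Int × Int) (cell : String) : List Int × Int :=
  if cell = "*" then (st.1, st.2 + 1)
  else if st.2 > 0 then (st.1 ++ [st.2], 0) else st

def get_row_hints (row : List String) : List Int :=
  let st := row.foldl pvStepA ([], 0)
  let hints := if st.2 > 0 then st.1 ++ [st.2] else st.1
  hints.reverse  -- hints[::-1] is exactly list reversal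

-- ===== PORT B =====
-- row[i] for an index B only uses in range; getD matches Python there
def pvAt (row : List String) (i : Nat) : String := row.getD i ""

-- the condition of B's `starts` comprehension
def pvStartP (row : List String) (i : Nat) : Bool :=
  pvAt row i == "*" && (i == 0 || !(pvAt row (i - 1) == "*"))

-- the condition of B's `ends` comprehension
def pvEndP (row : List String) (i : Nat) : Bool :=
  pvAt row i == "*" && (i == row.length - 1 || !(pvAt row (i + 1) == "*"))

def pvStarts (row : List String) : List Nat :=
  (List.range row.length).filter (pvStartP row)

def pvEnds (row : List String) : List Nat :=
  (List.range row.length).filter (pvEndP row)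

def get_row_hints_alt (row : List String) : List Int :=
  ((pvStarts row).reverse.zip (pvEnds row).reverse).map
    (fun p => (p.2 : Int) - (p.1 : Int) + 1)

-- ===== PRECONDITION & SPEC =====
def Spec_get_row_hints (row : List String) (out : List Int) : Prop := out = get_row_hints_alt row
instance (row : List String) (out : List Int) : Decidable (Spec_get_row_hints row out) := by unfold Spec_get_row_hints; infer_instance

-- ===== CLAIM (what is proved, stated in full; the proofs are below) =====
def Claim_equal_get_row_hints : Prop := ∀ (row : List String), Dom_get_row_hints row → Spec_get_row_hints row (get_row_hints row)

-- ===== LEMMAS AND PROOFS =====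

-- proof helper: the forward run-length list of a row (takeWhile form)
def pvRuns (cells : List String) : List Int :=
  match cells with
  | [] => []
  | c :: tail =>
    if c = "*" then
      ((1 : Int) + (tail.takeWhile (fun x => x = "*")).length)
        :: pvRuns (tail.dropWhile (fun x => x = "*"))
    else
      pvRuns tail
termination_by cells.length
decreasing_by
  · have := List.length_dropWhile_le (fun x => decide (x = "*")) tail
    simp; omega
  · simp

-- proof helper: the forward run-length list of a row (cons form)
def pvRunsC (cells : List String) : List Int :=
  match cells with
  | [] => []
  | c :: t =>
    if c = "*" then
      if pvAt t 0 = "*" then ((pvRunsC t).headD 0 + 1) :: (pvRunsC t).tail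
      else 1 :: pvRunsC t
    else pvRunsC t

-- ---------- A-side: A's flushed fold is pvRuns ----------

theorem foldA_stars (s : List String) (acc : List Int) (c : Int)
    (hs : ∀ x ∈ s, x = "*") :
    List.foldl pvStepA (acc, c) s = (acc, c + s.length) := by
  induction s generalizing c with
  | nil => simp
  | cons a t ih =>
      have ha : a = "*" := hs a (by simp)
      simp only [List.foldl_cons, pvStepA, if_pos ha]
      rw [ih _ (fun x hx => hs x (by simp [hx]))]
      simp; ring

theorem foldA_runs (n : Nat) : ∀ (l : List String), l.length ≤ n → ∀ (acc : List Int),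
    (if (List.foldl pvStepA (acc, (0 : Int)) l).2 > 0
      then (List.foldl pvStepA (acc, (0 : Int)) l).1 ++ [(List.foldl pvStepA (acc, (0 : Int)) l).2]
      else (List.foldl pvStepA (acc, (0 : Int)) l).1) = acc ++ pvRuns l := by
  induction n with
  | zero =>
      intro l hl acc
      have : l = [] := List.length_eq_zero_iff.mp (Nat.le_zero.mp hl)
      subst this; simp [pvRuns]
  | succ n ih =>
      intro l hl acc
      match l with
      | [] => simp [pvRuns]
      | c :: tail =>
        by_cases hc : c = "*"
        · have hsplit : tail.takeWhile (fun x => x = "*") ++ tail.dropWhile (fun x => x = "*") = tail :=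
            List.takeWhile_append_dropWhile
          have htws : ∀ x ∈ tail.takeWhile (fun x => x = "*"), x = "*" := by
            intro x hx
            have := List.mem_takeWhile_imp hx
            simpa using this
          have hk : (0 : Int) < 1 + (tail.takeWhile (fun x => x = "*")).length := by positivity
          have hfold1 : List.foldl pvStepA (acc, (0 : Int)) (c :: tail)
              = List.foldl pvStepA (acc, (1 : Int) + (tail.takeWhile (fun x => x = "*")).length)
                  (tail.dropWhile (fun x => x = "*")) := by
            rw [show (c :: tail) = (c :: tail.takeWhile (fun x => x = "*"))
                  ++ tail.dropWhile (fun x => x = "*") by rw [← hsplit]; simp]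
            rw [List.foldl_append]
            congr 1
            have hstars : List.foldl pvStepA (acc, (0 : Int)) (c :: tail.takeWhile (fun x => x = "*"))
                = (acc, 0 + ((c :: tail.takeWhile (fun x => x = "*")).length : Int)) :=
              foldA_stars _ acc 0 (by
                intro x hx
                rcases List.mem_cons.mp hx with h | h
                · rw [h, hc]
                · exact htws x h)
            rw [hstars]; simp; ring
          rw [pvRuns]
          simp only [if_pos hc]
          match hdd : tail.dropWhile (fun x => x = "*") with
          | [] =>
              rw [hfold1]
              simp only [hdd] at *
              simp [if_pos hk, pvRuns]
          | d :: rest =>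
              have hd : ¬ (d = "*") := by
                have h0 := List.head?_dropWhile_not (fun x => decide (x = "*")) tail
                rw [hdd] at h0
                simpa using h0
              have hfold2 : List.foldl pvStepA (acc, (1 : Int) + (tail.takeWhile (fun x => x = "*")).length) (d :: rest)
                  = List.foldl pvStepA (acc ++ [(1 : Int) + (tail.takeWhile (fun x => x = "*")).length], 0) rest := by
                simp only [List.foldl_cons, pvStepA, if_neg hd]
                rw [if_pos hk]
              have hlen : rest.length ≤ n := by
                have h1 : (tail.dropWhile (fun x => x = "*")).length ≤ tail.length :=
                  List.length_dropWhile_le _ _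
                rw [hdd] at h1
                simp at h1 hl
                omega
              have hih := ih rest hlen (acc ++ [(1 : Int) + (tail.takeWhile (fun x => x = "*")).length])
              rw [hfold1, hdd, hfold2, hih]
              have hrest : pvRuns (d :: rest) = pvRuns rest := by
                rw [pvRuns]; simp [hd]
              rw [hrest]
              simp
        · rw [pvRuns]
          simp only [if_neg hc]
          have hstep : List.foldl pvStepA (acc, (0 : Int)) (c :: tail)
              = List.foldl pvStepA (acc, 0) tail := by
            simp [pvStepA, if_neg hc]
          rw [hstep]
          exact ih tail (by simp at hl; omega) acc

-- ---------- bridge: pvRunsC = pvRuns ----------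

theorem pvRunsC_eq_pvRuns (l : List String) : pvRunsC l = pvRuns l := by
  induction l with
  | nil => rw [pvRunsC, pvRuns]
  | cons c t ih =>
      rw [pvRunsC, pvRuns]
      by_cases hc : c = "*"
      · simp only [if_pos hc]
        match t with
        | [] => simp [pvAt, pvRuns, pvRunsC]
        | h :: t' =>
            by_cases hh : h = "*"
            · have hAt : pvAt (h :: t') 0 = "*" := by simp [pvAt, hh]
              rw [if_pos hAt, ih, pvRuns, if_pos hh]
              simp [List.takeWhile, List.dropWhile, hh]
              ring
            · have hAt : ¬ pvAt (h :: t') 0 = "*" := by simp [pvAt, hh]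
              rw [if_neg hAt, ih]
              simp [List.takeWhile, List.dropWhile, hh]
      · simp only [if_neg hc]; exact ih

-- ---------- B-side cons lemmas for pvStarts / pvEnds ----------

theorem pvAt_nil (i : Nat) : pvAt ([] : List String) i = "" := by simp [pvAt]

theorem pvAt_cons_zero (c : String) (t : List String) : pvAt (c :: t) 0 = c := by simp [pvAt]

theorem pvAt_cons_succ (c : String) (t : List String) (j : Nat) :
    pvAt (c :: t) (j + 1) = pvAt t j := by simp [pvAt]

theorem pvEnds_cons (c : String) (t : List String) :
    pvEnds (c :: t)
      = (if c = "*" ∧ ¬ pvAt t 0 = "*" then [0] else []) ++ (pvEnds t).map (· + 1) := by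
  have hcong : List.filter ((pvEndP (c :: t)) ∘ Nat.succ) (List.range t.length)
      = List.filter (pvEndP t) (List.range t.length) := by
    apply List.filter_congr
    intro j hj
    have hj' : j < t.length := List.mem_range.mp hj
    have hb : ((Nat.succ j == (c :: t).length - 1) : Bool) = (j == t.length - 1) := by
      simp only [List.length_cons, Nat.succ_eq_add_one, Nat.add_sub_cancel]
      by_cases h : j + 1 = t.length
      · have h2 : j = t.length - 1 := by omega
        have h3 : t.length - 1 + 1 = t.length := by omega
        simp [h, h2, h3]
      · have h2 : ¬ j = t.length - 1 := by omega
        simp [h, h2]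
    simp only [Function.comp, pvEndP, Nat.succ_eq_add_one, pvAt_cons_succ] at *
    rw [← Nat.succ_eq_add_one j, hb]
  have hP0 : pvEndP (c :: t) 0 = decide (c = "*" ∧ ¬ pvAt t 0 = "*") := by
    by_cases ht : pvAt t 0 = "*"
    · have htne : t ≠ [] := by
        intro h; subst h; rw [pvAt_nil] at ht; exact absurd ht (by decide)
      obtain ⟨h0, t', rfl⟩ := List.exists_cons_of_ne_nil htne
      show (pvAt (c :: h0 :: t') 0 == "*"
          && (0 == (c :: h0 :: t').length - 1 || !(pvAt (c :: h0 :: t') 1 == "*"))) = _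
      rw [pvAt_cons_zero, pvAt_cons_succ, ht]
      simp [ht]
    · show (pvAt (c :: t) 0 == "*"
          && (0 == (c :: t).length - 1 || !(pvAt (c :: t) 1 == "*"))) = _
      rw [pvAt_cons_zero, pvAt_cons_succ]
      by_cases hc : c = "*" <;> simp [hc, ht]
  unfold pvEnds
  rw [List.length_cons, List.range_succ_eq_map, List.filter_cons, List.filter_map, hcong, hP0]
  by_cases h : c = "*" ∧ ¬ pvAt t 0 = "*"
  · simp [h, Nat.succ_eq_add_one]
  · simp [h, Nat.succ_eq_add_one]

theorem pvStartP_succ_succ (c : String) (t : List String) (j : Nat) :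
    pvStartP (c :: t) (j + 2) = pvStartP t (j + 1) := by
  show (pvAt (c :: t) (j + 2) == "*" && (j + 2 == 0 || !(pvAt (c :: t) (j + 1)  == "*"))) = _
  rw [pvAt_cons_succ, pvAt_cons_succ]
  simp [pvStartP]

theorem pvStarts_cons_not (c : String) (t : List String)
    (h : ¬ (c = "*" ∧ pvAt t 0 = "*")) :
    pvStarts (c :: t) = (if c = "*" then [0] else []) ++ (pvStarts t).map (· + 1) := by
  have hcong : List.filter ((pvStartP (c :: t)) ∘ Nat.succ) (List.range t.length)
      = List.filter (pvStartP t) (List.range t.length) := by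
    apply List.filter_congr
    intro j hj
    match j with
    | 0 =>
        show pvStartP (c :: t) 1 = pvStartP t 0
        by_cases ht : pvAt t 0 = "*"
        · have hc : ¬ c = "*" := fun hc => h ⟨hc, ht⟩
          simp [pvStartP, pvAt_cons_succ, pvAt_cons_zero, ht, hc]
        · simp [pvStartP, pvAt_cons_succ, ht]
    | j + 1 =>
        show pvStartP (c :: t) (j + 2) = pvStartP t (j + 1)
        exact pvStartP_succ_succ c t j
  have hP0 : pvStartP (c :: t) 0 = decide (c = "*") := by
    by_cases hc : c = "*" <;> simp [pvStartP, pvAt_cons_zero, hc]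
  unfold pvStarts
  rw [List.length_cons, List.range_succ_eq_map, List.filter_cons, List.filter_map, hcong, hP0]
  by_cases hc : c = "*"
  · simp [hc, Nat.succ_eq_add_one]
  · simp [hc, Nat.succ_eq_add_one]

theorem pvStarts_cons_merge (c : String) (t : List String)
    (hc : c = "*") (ht : pvAt t 0 = "*") :
    pvStarts (c :: t) = 0 :: ((pvStarts t).tail).map (· + 1)
      ∧ pvStarts t = 0 :: (pvStarts t).tail := by
  have htne : t ≠ [] := by
    intro h; subst h; rw [pvAt_nil] at ht; exact absurd ht (by decide)
  obtain ⟨h0, t', rfl⟩ := List.exists_cons_of_ne_nil htne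
  rw [pvAt_cons_zero] at ht
  have hPt0 : pvStartP (h0 :: t') 0 = true := by
    simp [pvStartP, pvAt_cons_zero, ht]
  have hstarts_t : pvStarts (h0 :: t')
      = 0 :: (List.filter ((pvStartP (h0 :: t')) ∘ Nat.succ) (List.range t'.length)).map Nat.succ := by
    unfold pvStarts
    rw [List.length_cons, List.range_succ_eq_map, List.filter_cons, List.filter_map, hPt0]
    simp
  have hP1 : pvStartP (c :: h0 :: t') 1 = false := by
    simp [pvStartP, pvAt_cons_succ, pvAt_cons_zero, hc]
  have hP0 : pvStartP (c :: h0 :: t') 0 = true := by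
    simp [pvStartP, pvAt_cons_zero, hc]
  have hcong : List.filter ((pvStartP (c :: h0 :: t')) ∘ Nat.succ ∘ Nat.succ) (List.range t'.length)
      = List.filter ((pvStartP (h0 :: t')) ∘ Nat.succ) (List.range t'.length) := by
    apply List.filter_congr
    intro j hj
    show pvStartP (c :: h0 :: t') (j + 2) = pvStartP (h0 :: t') (j + 1)
    exact pvStartP_succ_succ c (h0 :: t') j
  constructor
  · unfold pvStarts
    rw [List.length_cons, List.range_succ_eq_map, List.filter_cons, hP0]
    rw [List.length_cons, List.range_succ_eq_map]
    simp only [List.map_cons, List.filter_cons, List.filter_map]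
    rw [hP1]
    simp only [Bool.false_eq_true, if_false]
    rw [show (pvStartP (c :: h0 :: t') ∘ Nat.succ) ∘ Nat.succ
          = pvStartP (c :: h0 :: t') ∘ Nat.succ ∘ Nat.succ from rfl, hcong]
    simp [hPt0, Nat.succ_eq_add_one, Function.comp]
  · rw [hstarts_t]
    rfl

theorem pv_len_eq (l : List String) : (pvEnds l).length = (pvStarts l).length := by
  induction l with
  | nil => rfl
  | cons c t ih =>
      by_cases hm : c = "*" ∧ pvAt t 0 = "*"
      · obtain ⟨hs, hhead⟩ := pvStarts_cons_merge c t hm.1 hm.2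
        rw [pvEnds_cons, hs, if_neg (by tauto)]
        have hlt : (pvStarts t).length = (pvStarts t).tail.length + 1 := by
          conv_lhs => rw [hhead]
          simp
        simp only [List.nil_append, List.length_cons, List.length_map, ih, hlt]
      · rw [pvEnds_cons, pvStarts_cons_not c t hm]
        by_cases hc : c = "*"
        · have ht : ¬ pvAt t 0 = "*" := fun h => hm ⟨hc, h⟩
          rw [if_pos ⟨hc, ht⟩, if_pos hc]
          simp [ih]
        · have hx : ¬ (c = "*" ∧ ¬ pvAt t 0 = "*") := fun h => hc h.1
          rw [if_neg hx, if_neg hc]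
          simp [ih]

-- ---------- B-side: zipped hints are pvRunsC ----------

def pvH (l : List String) : List Int :=
  ((pvStarts l).zip (pvEnds l)).map (fun p => (p.2 : Int) - (p.1 : Int) + 1)

theorem pvMapShift (a b : List Nat) :
    List.map (fun p => ((p.2 : Nat) : Int) - ((p.1 : Nat) : Int) + 1)
        ((a.map (· + 1)).zip (b.map (· + 1)))
      = List.map (fun p => ((p.2 : Nat) : Int) - ((p.1 : Nat) : Int) + 1) (a.zip b) := by
  rw [List.zip_map, List.map_map]
  apply List.map_congr_left
  intro p _
  simp [Prod.map]

theorem pvH_eq_pvRunsC (l : List String) : pvH l = pvRunsC l := by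
  induction l with
  | nil => rfl
  | cons c t ih =>
      by_cases hc : c = "*"
      · by_cases ht : pvAt t 0 = "*"
        · -- merge case: the first run of t is extended by one
          obtain ⟨hs, hhead⟩ := pvStarts_cons_merge c t hc ht
          have he : pvEnds (c :: t) = (pvEnds t).map (· + 1) := by
            rw [pvEnds_cons, if_neg (by tauto)]; rfl
          have hlen : (pvEnds t).length = (pvStarts t).length := pv_len_eq t
          have hne : pvEnds t ≠ [] := by
            intro h0
            rw [h0, hhead] at hlen
            simp at hlen
          obtain ⟨e0, e', he'⟩ := List.exists_cons_of_ne_nil hne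
          unfold pvH
          rw [hs, he, he', List.map_cons]
          rw [pvRunsC, if_pos hc, if_pos ht, ← ih]
          unfold pvH
          rw [hhead, he']
          simp only [List.zip_cons_cons, List.map_cons, List.headD_cons, List.tail_cons]
          rw [List.cons_eq_cons]
          constructor
          · push_cast; ring
          · exact pvMapShift _ _
        · -- a new run of length 1 starts at the head
          have hs : pvStarts (c :: t) = 0 :: (pvStarts t).map (· + 1) := by
            rw [pvStarts_cons_not c t (fun h => ht h.2), if_pos hc]; rfl
          have he : pvEnds (c :: t) = 0 :: (pvEnds t).map (· + 1) := by
            rw [pvEnds_cons, if_pos ⟨hc, ht⟩]; rfl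
          unfold pvH
          rw [hs, he, List.zip_cons_cons, List.map_cons]
          rw [pvRunsC, if_pos hc, if_neg ht, ← ih]
          unfold pvH
          rw [List.cons_eq_cons]
          constructor
          · norm_num
          · exact pvMapShift _ _
      · -- head is not "*": starts and ends just shift
        have hs : pvStarts (c :: t) = (pvStarts t).map (· + 1) := by
          rw [pvStarts_cons_not c t (fun h => hc h.1), if_neg hc]; rfl
        have he : pvEnds (c :: t) = (pvEnds t).map (· + 1) := by
          rw [pvEnds_cons, if_neg (fun h => hc h.1)]; rfl
        unfold pvH
        rw [hs, he, pvRunsC, if_neg hc, ← ih]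
        unfold pvH
        exact pvMapShift _ _

-- ===== VERDICT (by name: the statement is the Claim_ definition above) =====
theorem get_row_hints_spec : Claim_equal_get_row_hints := by
  intro row _
  unfold Spec_get_row_hints get_row_hints get_row_hints_alt
  have hz : (pvStarts row).reverse.zip (pvEnds row).reverse
      = ((pvStarts row).zip (pvEnds row)).reverse := by
    have hl : (pvStarts row).length = (pvEnds row).length := (pv_len_eq row).symm
    simp only [List.zip]
    rw [← List.reverse_zipWith hl]
  rw [hz, List.map_reverse]
  show (if (List.foldl pvStepA (([] : List Int), (0 : Int)) row).2 > 0
      then (List.foldl pvStepA (([] : List Int), (0 : Int)) row).1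
            ++ [(List.foldl pvStepA (([] : List Int), (0 : Int)) row).2]
      else (List.foldl pvStepA (([] : List Int), (0 : Int)) row).1).reverse
    = (pvH row).reverse
  rw [foldA_runs row.length row le_rfl [], pvH_eq_pvRunsC, pvRunsC_eq_pvRuns]
  simp
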